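-- pv_equiv track=rewrite | github.com/sgbmzm/Halacha-T-S3 | drivers/mpy_heb_date.py | move_heb_date
-- ===== SOURCE A (Python) =====
-- def get_year_structure(year_length):
--
--     # מבני השנים האפשריים
--     structures = {
--         353: [30, 29, 29, 29, 30, 29, 30, 29, 30, 29, 30, 29],
--         354: [30, 29, 30, 29, 30, 29, 30, 29, 30, 29, 30, 29],
--         355: [30, 30, 30, 29, 30, 29, 30, 29, 30, 29, 30, 29],
--         383: [30, 29, 29, 29, 30, 30, 29, 30, 29, 30, 29, 30, 29],
--         384: [30, 29, 30, 29, 30, 30, 29, 30, 29, 30, 29, 30, 29],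
--         385: [30, 30, 30, 29, 30, 30, 29, 30, 29, 30, 29, 30, 29]
--     }
--     return structures.get(year_length)
--
-- def move_heb_date(start_day, start_month, year_length, days_to_move):
--     # קבלת מבנה השנה
--     year_structure = get_year_structure(year_length)
--     if not year_structure:
--         raise ValueError("אורך השנה לא תקין")
--
--     # האם השנה מעוברת
--     is_leap = year_length in [383, 384, 385]
--
--     # חישוב היום החדש
--     current_day = start_day
--     current_month = start_month
--
--     # הזזה קדימה או אחורה
--     while days_to_move != 0:
--         days_in_month = year_structure[current_month - 1]
--         if days_to_move > 0:  # הזזה קדימה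
--             remaining_days_in_month = days_in_month - current_day
--             if days_to_move <= remaining_days_in_month:
--                 current_day += days_to_move
--                 days_to_move = 0
--             else:
--                 days_to_move -= (remaining_days_in_month + 1)
--                 current_day = 1
--                 current_month += 1
--                 if current_month > len(year_structure):  # מעבר לשנה הבאה
--                     if days_to_move == 0:  # בדיוק ביום האחרון
--                         current_month -= 1
--                         current_day = year_structure[current_month - 1]
--                     else:
--                         raise ValueError("החישוב חרג מגבולות השנה")
--         else:  # הזזה אחורה
--             if abs(days_to_move) < current_day:
--                 current_day += days_to_move
--                 days_to_move = 0
--             else: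
--                 days_to_move += current_day
--                 current_month -= 1
--                 if current_month < 1:  # מעבר לשנה קודמת
--                     raise ValueError("החישוב חרג מגבולות השנה")
--                 current_day = year_structure[current_month - 1]
--
--     return current_day, current_month
-- ===== SOURCE B (Python) =====
-- def move_heb_date(start_day, start_month, year_length, days_to_move):
--     structures = {
--         353: [30, 29, 29, 29, 30, 29, 30, 29, 30, 29, 30, 29],
--         354: [30, 29, 30, 29, 30, 29, 30, 29, 30, 29, 30, 29],
--         355: [30, 30, 30, 29, 30, 29, 30, 29, 30, 29, 30, 29],
--         383: [30, 29, 29, 29, 30, 30, 29, 30, 29, 30, 29, 30, 29],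
--         384: [30, 29, 30, 29, 30, 30, 29, 30, 29, 30, 29, 30, 29],
--         385: [30, 30, 30, 29, 30, 30, 29, 30, 29, 30, 29, 30, 29]
--     }
--     ys = structures.get(year_length)
--     if not ys:
--         raise ValueError("אורך השנה לא תקין")
--     if days_to_move == 0:
--         return start_day, start_month
--     # cumulative prefix sums of month lengths
--     prefix = [0]
--     s = 0
--     for m in ys:
--         s += m
--         prefix.append(s)
--     target = prefix[start_month - 1] + start_day + days_to_move
--     if target < 1 or target > s:
--         raise ValueError("החישוב חרג מגבולות השנה")
--     month = 1
--     while target > prefix[month]: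
--         month += 1
--     return target - prefix[month - 1], month
-- ===== Notes on version B (the rewrite author's own statement) =====
-- stated objective: alternative
-- what changed: Replaces A's month-by-month stepping while-loop over the date state with day-of-year arithmetic: build a cumulative prefix-sum list of month lengths once, add days_to_move to the absolute day index, bounds-check it, and locate the resulting month by a single scan of the prefix list.
-- outside the precondition, e.g. on move_heb_date(29, 12, 354, 1): A returns (29, 12), B raises ValueError; on move_heb_date(50, 2, 354, -5): A returns (45, 2), B returns (16, 3); on move_heb_date(5, 0, 354, 3): A returns (8, 0), B raises ValueError
import Mathlib
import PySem

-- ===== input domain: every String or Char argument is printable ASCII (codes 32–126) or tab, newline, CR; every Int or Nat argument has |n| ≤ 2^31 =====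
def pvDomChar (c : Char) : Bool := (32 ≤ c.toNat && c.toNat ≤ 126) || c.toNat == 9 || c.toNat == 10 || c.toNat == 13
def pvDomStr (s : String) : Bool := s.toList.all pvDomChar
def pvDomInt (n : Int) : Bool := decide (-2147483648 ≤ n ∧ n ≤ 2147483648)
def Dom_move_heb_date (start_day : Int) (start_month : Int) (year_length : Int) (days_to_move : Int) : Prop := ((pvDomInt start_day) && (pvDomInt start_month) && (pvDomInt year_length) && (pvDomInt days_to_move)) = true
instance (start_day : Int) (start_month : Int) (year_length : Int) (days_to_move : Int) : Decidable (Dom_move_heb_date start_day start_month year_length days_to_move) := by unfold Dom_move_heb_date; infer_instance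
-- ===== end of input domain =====

-- B replaces A's month-by-month stepping loop with prefix-sum day-of-year arithmetic (same cost; 'alternative').
-- Equivalence is claimed for the RETURN value on Pre_ (the natural domain; both programs raise outside it except as cited).

-- ===== PORT A =====
def get_year_structure (year_length : Int) : Option (List Int) :=
  (PySem.Dict.ofList [
    ((353 : Int), ([30, 29, 29, 29, 30, 29, 30, 29, 30, 29, 30, 29] : List Int)),
    (354, [30, 29, 30, 29, 30, 29, 30, 29, 30, 29, 30, 29]),
    (355, [30, 30, 30, 29, 30, 29, 30, 29, 30, 29, 30, 29]),
    (383, [30, 29, 29, 29, 30, 30, 29, 30, 29, 30, 29, 30, 29]),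
    (384, [30, 29, 30, 29, 30, 30, 29, 30, 29, 30, 29, 30, 29]),
    (385, [30, 30, 30, 29, 30, 30, 29, 30, 29, 30, 29, 30, 29])]).get? year_length

-- A's while-loop; fuel-indexed (the loop moves the month by ±1 each non-final step, so fuel 40 is never
-- exhausted where the Python returns); `none` = the Python raises (ValueError / IndexError via pyGet?).
def loopA (ys : List Int) : Nat → Int → Int → Int → Option (Int × Int)
  | 0, d, m, t => if t = 0 then some (d, m) else none
  | fuel+1, d, m, t =>
    if t = 0 then some (d, m)
    else
      match PySem.List.pyGet? ys (m - 1) with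
      | none => none                           -- IndexError
      | some dim =>
        if 0 < t then
          if t ≤ dim - d then some (d + t, m)
          else
            if m + 1 > (ys.length : Int) then
              -- month rolled past the year end: exactly the last day, or ValueError
              if t - (dim - d + 1) = 0 then some (dim, m) else none
            else loopA ys fuel 1 (m + 1) (t - (dim - d + 1))
        else
          if -t < d then some (d + t, m)
          else
            if m - 1 < 1 then none             -- ValueError: before the year start
            else
              match PySem.List.pyGet? ys (m - 1 - 1) with
              | none => none
              | some d' => loopA ys fuel d' (m - 1) (t + d)

def move_heb_date (start_day : Int) (start_month : Int) (year_length : Int) (days_to_move : Int) : Int × Int :=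
  match get_year_structure year_length with
  | none => (0, 0)                             -- ValueError: invalid year length
  | some ys =>
    if ys = [] then (0, 0)                     -- 'if not year_structure' also catches []
    else (loopA ys 40 start_day start_month days_to_move).getD (0, 0)

-- ===== PORT B =====
def alt_structures : PySem.Dict Int (List Int) :=
  PySem.Dict.ofList [
    ((353 : Int), ([30, 29, 29, 29, 30, 29, 30, 29, 30, 29, 30, 29] : List Int)),
    (354, [30, 29, 30, 29, 30, 29, 30, 29, 30, 29, 30, 29]),
    (355, [30, 30, 30, 29, 30, 29, 30, 29, 30, 29, 30, 29]),
    (383, [30, 29, 29, 29, 30, 30, 29, 30, 29, 30, 29, 30, 29]),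
    (384, [30, 29, 30, 29, 30, 30, 29, 30, 29, 30, 29, 30, 29]),
    (385, [30, 30, 30, 29, 30, 30, 29, 30, 29, 30, 29, 30, 29])]

-- B's 'while target > prefix[month]: month += 1'; fuel = len(prefix) (enough: target ≤ prefix[-1]).
def locB (pfx : List Int) (target : Int) : Int → Nat → Option (Int × Int)
  | _, 0 => none
  | month, fuel+1 =>
    match PySem.List.pyGet? pfx month with
    | none => none
    | some pm =>
      if target > pm then locB pfx target (month + 1) fuel
      else
        match PySem.List.pyGet? pfx (month - 1) with
        | none => none
        | some pm1 => some (target - pm1, month)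

def altBody (ys : List Int) (start_day start_month days_to_move : Int) : Int × Int :=
  if days_to_move = 0 then (start_day, start_month)
  else
    let ps := ys.foldl (fun p m => (p.1 ++ [p.2 + m], p.2 + m)) (([0] : List Int), (0 : Int))
    match PySem.List.pyGet? ps.1 (start_month - 1) with
    | none => (0, 0)                           -- IndexError
    | some base =>
      let target := base + start_day + days_to_move
      if target < 1 ∨ target > ps.2 then (0, 0)  -- ValueError: out of the year
      else (locB ps.1 target 1 ps.1.length).getD (0, 0)

def move_heb_date_alt (start_day : Int) (start_month : Int) (year_length : Int) (days_to_move : Int) : Int × Int :=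
  match alt_structures.get? year_length with
  | none => (0, 0)                             -- ValueError: invalid year length
  | some ys =>
    if ys = [] then (0, 0)
    else altBody ys start_day start_month days_to_move

-- ===== PRECONDITION & SPEC =====
def preYs (year_length : Int) : Option (List Int) :=
  if year_length = 353 then some [30, 29, 29, 29, 30, 29, 30, 29, 30, 29, 30, 29]
  else if year_length = 354 then some [30, 29, 30, 29, 30, 29, 30, 29, 30, 29, 30, 29]
  else if year_length = 355 then some [30, 30, 30, 29, 30, 29, 30, 29, 30, 29, 30, 29]
  else if year_length = 383 then some [30, 29, 29, 29, 30, 30, 29, 30, 29, 30, 29, 30, 29]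
  else if year_length = 384 then some [30, 29, 30, 29, 30, 30, 29, 30, 29, 30, 29, 30, 29]
  else if year_length = 385 then some [30, 30, 30, 29, 30, 30, 29, 30, 29, 30, 29, 30, 29]
  else none

-- Pre_ = a valid year length and (unless days_to_move = 0, which A returns unvalidated) a month index inside
-- the year with the shifted day-of-year inside [1, year_length], plus, when the move ends inside the starting
-- month itself, that the resulting day is a real day of that month. It excludes inputs where A raises (invalid
-- year length, month index beyond the list, a move past the year bounds) and, restricting to the natural domain,
-- inputs where A still returns via artefacts of its implementation: negative-index month wraparound, a
-- nonpositive or month-overflowing day left over from a malformed start_day, and the off-by-one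
-- target = year_length + 1 (where A returns the year's last day but B, like any move past the end, raises).
def Pre_move_heb_date (start_day : Int) (start_month : Int) (year_length : Int) (days_to_move : Int) : Prop :=
  (preYs year_length).isSome = true ∧
  (days_to_move = 0 ∨
    (1 ≤ start_month ∧ start_month ≤ (((preYs year_length).getD []).length : Int) ∧
     1 ≤ (((preYs year_length).getD []).take (start_month - 1).toNat).sum + start_day + days_to_move ∧
     (((preYs year_length).getD []).take (start_month - 1).toNat).sum + start_day + days_to_move ≤ ((preYs year_length).getD []).sum ∧
     (0 < days_to_move → days_to_move ≤ ((preYs year_length).getD []).getD (start_month - 1).toNat 0 - start_day → 1 ≤ start_day + days_to_move) ∧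
     (days_to_move < 0 → -days_to_move < start_day → start_day + days_to_move ≤ ((preYs year_length).getD []).getD (start_month - 1).toNat 0)))

instance (start_day : Int) (start_month : Int) (year_length : Int) (days_to_move : Int) : Decidable (Pre_move_heb_date start_day start_month year_length days_to_move) := by unfold Pre_move_heb_date; infer_instance

def pvWitness_move_heb_date : Int × Int × Int × Int := (15, 2, 354, 40)

def Spec_move_heb_date (start_day : Int) (start_month : Int) (year_length : Int) (days_to_move : Int) (out : Int × Int) : Prop := out = move_heb_date_alt start_day start_month year_length days_to_move
instance (start_day : Int) (start_month : Int) (year_length : Int) (days_to_move : Int) (out : Int × Int) : Decidable (Spec_move_heb_date start_day start_month year_length days_to_move out) := by unfold Spec_move_heb_date; infer_instance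

-- ===== CLAIM (what is proved, stated in full; the proofs are below) =====
def Claim_equal_move_heb_date : Prop := ∀ (start_day : Int) (start_month : Int) (year_length : Int) (days_to_move : Int), Dom_move_heb_date start_day start_month year_length days_to_move → Pre_move_heb_date start_day start_month year_length days_to_move → Spec_move_heb_date start_day start_month year_length days_to_move (move_heb_date start_day start_month year_length days_to_move)

-- ===== LEMMAS AND PROOFS =====

-- cumulative sum of the first k month lengths
def pvCum (ys : List Int) (k : Nat) : Int := (ys.take k).sum

lemma pvCum_succ (ys : List Int) (k : Nat) (h : k < ys.length) :
    pvCum ys (k+1) = pvCum ys k + ys[k] := by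
  rw [pvCum, pvCum, List.take_add_one, List.sum_append, List.getElem?_eq_getElem h]
  simp

lemma pvCum_lt (ys : List Int) (hpos : ∀ x ∈ ys, 1 ≤ x) :
    ∀ {k l : Nat}, k < l → l ≤ ys.length → pvCum ys k < pvCum ys l := by
  intro k l hkl hl
  induction l with
  | zero => omega
  | succ l ih =>
    have hlen : l < ys.length := by omega
    have hy : 1 ≤ ys[l] := hpos _ (List.getElem_mem hlen)
    rcases Nat.lt_succ_iff_lt_or_eq.mp hkl with h | h
    · have := ih h (by omega); rw [pvCum_succ ys l hlen]; omega
    · subst h; rw [pvCum_succ ys k hlen]; omega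

lemma pvCum_mono (ys : List Int) (hpos : ∀ x ∈ ys, 1 ≤ x)
    {k l : Nat} (hkl : k ≤ l) (hl : l ≤ ys.length) : pvCum ys k ≤ pvCum ys l := by
  rcases Nat.lt_or_ge k l with h | h
  · exact le_of_lt (pvCum_lt ys hpos h hl)
  · have : k = l := by omega
    simp [this]

-- the month containing a given day-of-year is unique
lemma loc_unique (ys : List Int) (hpos : ∀ x ∈ ys, 1 ≤ x) {T : Int} {j j' : Nat}
    (h1 : 1 ≤ j) (h2 : j ≤ ys.length) (h3 : pvCum ys (j-1) < T) (h4 : T ≤ pvCum ys j)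
    (h1' : 1 ≤ j') (h2' : j' ≤ ys.length) (h3' : pvCum ys (j'-1) < T) (h4' : T ≤ pvCum ys j') :
    j = j' := by
  by_contra hne
  rcases Nat.lt_or_ge j j' with h | h
  · have : pvCum ys j ≤ pvCum ys (j'-1) := pvCum_mono ys hpos (by omega) (by omega)
    omega
  · have hj : j' < j := by omega
    have : pvCum ys j' ≤ pvCum ys (j-1) := pvCum_mono ys hpos (by omega) (by omega)
    omega

lemma getD_eq_getElem (ys : List Int) (k : Nat) (h : k < ys.length) : ys.getD k 0 = ys[k] := by
  simp [List.getD, List.getElem?_eq_getElem h]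

-- A's loop computes the (unique) month/day of the shifted day-of-year
lemma pyGet_ys (ys : List Int) (k : Nat) (h : k < ys.length) :
    PySem.List.pyGet? ys ((k:Int)) = some ys[k] := by
  rw [PySem.List.pyGet?_natCast]
  simp [List.getElem?_eq_getElem h]

lemma loopA_loc (ys : List Int) (hpos : ∀ x ∈ ys, 1 ≤ x) :
    ∀ (fuel : Nat) (d t : Int) (m : Nat),
      1 ≤ m → m ≤ ys.length →
      (t = 0 → 1 ≤ d) → (t = 0 → d ≤ ys.getD (m-1) 0) →
      (0 < t → t ≤ ys.getD (m-1) 0 - d → 1 ≤ d + t) →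
      (t < 0 → -t < d → d + t ≤ ys.getD (m-1) 0) →
      1 ≤ pvCum ys (m-1) + d + t → pvCum ys (m-1) + d + t ≤ pvCum ys ys.length →
      (0 < t → (ys.length : Int) - m < fuel) → (t < 0 → (m : Int) ≤ fuel) →
      ∃ j : Nat, 1 ≤ j ∧ j ≤ ys.length ∧
        pvCum ys (j-1) < pvCum ys (m-1) + d + t ∧ pvCum ys (m-1) + d + t ≤ pvCum ys j ∧
        loopA ys fuel d (m : Int) t = some (pvCum ys (m-1) + d + t - pvCum ys (j-1), (j : Int)) := by
  intro fuel
  induction fuel with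
  | zero =>
    intro d t m h1 h2 h0a h0b hfw hbw hT1 hT2 hf1 hf2
    have ht0 : t = 0 := by
      rcases lt_trichotomy t 0 with h|h|h
      · have := hf2 h; omega
      · exact h
      · have := hf1 h; omega
    subst ht0
    have hm1 : m - 1 < ys.length := by omega
    have hd1 := h0a rfl
    have hd2 := h0b rfl
    rw [getD_eq_getElem ys (m-1) hm1] at hd2
    have hcs := pvCum_succ ys (m-1) hm1
    have hm : m - 1 + 1 = m := by omega
    rw [hm] at hcs
    exact ⟨m, h1, h2, by omega, by omega, by rw [loopA]; simp⟩
  | succ f ih =>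
    intro d t m h1 h2 h0a h0b hfw hbw hT1 hT2 hf1 hf2
    have hm1 : m - 1 < ys.length := by omega
    have hcs := pvCum_succ ys (m-1) hm1
    rw [show m - 1 + 1 = m by omega] at hcs
    by_cases ht0 : t = 0
    · subst ht0
      have hd1 := h0a rfl
      have hd2 := h0b rfl
      rw [getD_eq_getElem ys (m-1) hm1] at hd2
      exact ⟨m, h1, h2, by omega, by omega, by rw [loopA]; simp⟩
    · have hidx : PySem.List.pyGet? ys ((m:Int) - 1) = some ys[m-1] := by
        rw [show (m:Int) - 1 = ((m-1 : Nat) : Int) by omega]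
        exact pyGet_ys ys (m-1) hm1
      have hgd : ys.getD (m-1) 0 = ys[m-1] := getD_eq_getElem ys (m-1) hm1
      by_cases htpos : 0 < t
      · by_cases hrem : t ≤ ys[m-1] - d
        · -- stays in the month
          have hd1 : (1:Int) ≤ d + t := hfw htpos (by omega)
          refine ⟨m, h1, h2, by omega, by omega, ?_⟩
          rw [loopA]
          simp only [ht0, hidx, htpos, if_pos, hrem]
          simp; omega
        · -- month overflow cannot leave the year inside Pre_
          have hmlt : m < ys.length := by
            by_contra hcon
            have hmeq : m = ys.length := by omega
            subst hmeq
            omega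
          have harith : pvCum ys ((m+1)-1) + 1 + (t - (ys[m-1] - d + 1)) = pvCum ys (m-1) + d + t := by
            rw [show (m+1)-1 = m by omega]; omega
          have hy1 : (1:Int) ≤ ys.getD ((m+1)-1) 0 := by
            rw [show (m+1)-1 = m by omega, getD_eq_getElem ys m hmlt]
            exact hpos _ (List.getElem_mem hmlt)
          obtain ⟨j, hj1, hj2, hj3, hj4, hj5⟩ := ih 1 (t - (ys[m-1] - d + 1)) (m+1)
            (by omega) (by omega) (by intro _; omega) (by intro _; exact hy1)
            (by intro h _; omega) (by intro h _; omega)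
            (by rw [harith]; omega) (by rw [harith]; omega)
            (by intro h; omega) (by intro h; omega)
          rw [harith] at hj3 hj4 hj5
          refine ⟨j, hj1, hj2, hj3, hj4, ?_⟩
          rw [loopA]
          simp only [ht0, hidx, htpos, if_pos, hrem, if_false]
          rw [show (m:Int) + 1 = ((m+1 : Nat) : Int) by push_cast; ring]
          rw [if_neg (show ¬(((m+1 : Nat) : Int) > (ys.length : Int)) by push_cast; omega)]
          exact hj5
      · have htneg : t < 0 := by omega
        by_cases habs : -t < d
        · have hd2 : d + t ≤ ys[m-1] := by rw [← hgd]; exact hbw htneg habs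
          refine ⟨m, h1, h2, by omega, by omega, ?_⟩
          rw [loopA]
          simp only [ht0, hidx, htpos, if_false, habs, if_pos]
          simp
          omega
        · have hm2 : 2 ≤ m := by
            by_contra hcon
            have : m = 1 := by omega
            subst this
            simp [pvCum] at hT1
            omega
          have hm2lt : m - 2 < ys.length := by omega
          have hidx2 : PySem.List.pyGet? ys ((m:Int) - 1 - 1) = some ys[m-2] := by
            rw [show (m:Int) - 1 - 1 = ((m-2 : Nat) : Int) by omega]
            exact pyGet_ys ys (m-2) hm2lt
          have hcs2 := pvCum_succ ys (m-2) hm2lt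
          rw [show m - 2 + 1 = m - 1 by omega] at hcs2
          have harith : pvCum ys ((m-1)-1) + ys[m-2] + (t + d) = pvCum ys (m-1) + d + t := by
            rw [show (m-1)-1 = m-2 by omega]; omega
          have hgd2 : ys.getD ((m-1)-1) 0 = ys[m-2] := by
            rw [show (m-1)-1 = m-2 by omega, getD_eq_getElem ys (m-2) hm2lt]
          obtain ⟨j, hj1, hj2, hj3, hj4, hj5⟩ := ih ys[m-2] (t + d) (m-1)
            (by omega) (by omega) (by intro _; exact hpos _ (List.getElem_mem hm2lt))
            (by intro _; rw [hgd2]) (by intro h _; omega) (by intro _ _; rw [hgd2]; omega)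
            (by rw [harith]; omega) (by rw [harith]; omega)
            (by intro h; omega) (by intro h; omega)
          rw [harith] at hj3 hj4 hj5
          refine ⟨j, hj1, hj2, hj3, hj4, ?_⟩
          rw [loopA]
          simp only [ht0, hidx, htpos, if_false, habs, hidx2]
          rw [if_neg (by omega)]
          rw [show (m:Int) - 1 = ((m-1 : Nat) : Int) by omega]
          exact hj5

-- the prefix-sum fold
lemma fold_prefix (ys : List Int) : ∀ (acc : List Int) (s : Int),
    ys.foldl (fun p m => (p.1 ++ [p.2 + m], p.2 + m)) (acc, s)
      = (acc ++ (List.range ys.length).map (fun k => s + (ys.take (k+1)).sum), s + ys.sum) := by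
  induction ys with
  | nil => intro acc s; simp
  | cons y ys ih =>
    intro acc s
    simp only [List.foldl_cons, ih, List.length_cons, List.range_succ_eq_map, List.map_cons,
      List.map_map, Function.comp_def, List.take_succ_cons, List.sum_cons, List.sum_nil,
      List.take_zero, List.append_assoc, List.singleton_append]
    refine Prod.ext ?_ (by ring)
    simp only [add_zero, Nat.succ_eq_add_one]
    congr 2
    apply List.map_congr_left
    intro k _
    ring


lemma prefix_eq (ys : List Int) :
    ys.foldl (fun p m => (p.1 ++ [p.2 + m], p.2 + m)) (([0] : List Int), (0 : Int))
      = ((List.range (ys.length + 1)).map (pvCum ys), ys.sum) := by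
  rw [fold_prefix]
  refine Prod.ext ?_ (by simp)
  simp [pvCum, List.range_succ_eq_map, List.map_map, Function.comp_def]


-- B's scan finds the same month
lemma pyGet_prefix (ys : List Int) (m : Nat) (h : m ≤ ys.length) :
    PySem.List.pyGet? ((List.range (ys.length+1)).map (pvCum ys)) ((m:Int)) = some (pvCum ys m) := by
  rw [PySem.List.pyGet?_natCast]
  simp [Nat.lt_succ_of_le h]

lemma locB_loc (ys : List Int) (T : Int)
    (hT2 : T ≤ pvCum ys ys.length) :
    ∀ (fuel : Nat) (m : Nat), 1 ≤ m → m ≤ ys.length → pvCum ys (m-1) < T →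
      ys.length - m < fuel →
      ∃ j : Nat, 1 ≤ j ∧ j ≤ ys.length ∧ pvCum ys (j-1) < T ∧ T ≤ pvCum ys j ∧
        locB ((List.range (ys.length + 1)).map (pvCum ys)) T (m : Int) fuel
          = some (T - pvCum ys (j-1), (j : Int)) := by
  intro fuel
  induction fuel with
  | zero => intro m h1 h2 h3 hf; omega
  | succ f ih =>
    intro m h1 h2 h3 hf
    have hP := pyGet_prefix ys m h2
    by_cases hc : T > pvCum ys m
    · have hmlt : m < ys.length := by
        by_contra h
        have : m = ys.length := by omega
        subst this; omega
      have hcast : (m:Int) + 1 = ((m+1 : Nat) : Int) := by push_cast; ring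
      obtain ⟨j, hj1, hj2, hj3, hj4, hj5⟩ := ih (m+1) (by omega) (by omega)
        (by simpa using hc) (by omega)
      refine ⟨j, hj1, hj2, hj3, hj4, ?_⟩
      rw [locB, hP]
      simp only [hc, if_pos]
      rw [hcast, hj5]
    · have hm1 : (m:Int) - 1 = ((m-1 : Nat) : Int) := by omega
      have hP1 := pyGet_prefix ys (m-1) (by omega)
      refine ⟨m, h1, h2, h3, by omega, ?_⟩
      rw [locB, hP]
      simp only [hc, if_false]
      rw [hm1, hP1]


-- the two loop bodies agree on the natural domain
lemma pvCum_len (ys : List Int) : pvCum ys ys.length = ys.sum := by simp [pvCum]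

lemma core (ys : List Int) (hpos : ∀ x ∈ ys, 1 ≤ x) (hn : 1 ≤ ys.length) (hn' : ys.length ≤ 13)
    (sd sm t : Int)
    (hpre : t = 0 ∨
      (1 ≤ sm ∧ sm ≤ (ys.length : Int) ∧
       1 ≤ (ys.take (sm - 1).toNat).sum + sd + t ∧
       (ys.take (sm - 1).toNat).sum + sd + t ≤ ys.sum ∧
       (0 < t → t ≤ ys.getD (sm - 1).toNat 0 - sd → 1 ≤ sd + t) ∧
       (t < 0 → -t < sd → sd + t ≤ ys.getD (sm - 1).toNat 0))) :
    (loopA ys 40 sd sm t).getD (0, 0) = altBody ys sd sm t := by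
  by_cases ht : t = 0
  · subst ht
    have hL : loopA ys 40 sd sm 0 = some (sd, sm) := by
      rw [show (40:Nat) = 39+1 from rfl, loopA]; simp
    simp [hL, altBody]
  · rcases hpre with h | ⟨hm1, hm2, hT1, hT2, hfwP, hbwP⟩
    · exact absurd h ht
    have hmN : ((sm.toNat : Nat) : Int) = sm := by omega
    set m : Nat := sm.toNat with hmdef
    have h1 : 1 ≤ m := by omega
    have h2 : m ≤ ys.length := by omega
    have hsub : (sm - 1).toNat = m - 1 := by omega
    rw [hsub] at hT1 hT2 hfwP hbwP
    have hT2' : (ys.take (m-1)).sum + sd + t ≤ pvCum ys ys.length := by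
      rw [pvCum_len]; exact hT2
    obtain ⟨j, hj1, hj2, hj3, hj4, hj5⟩ := loopA_loc ys hpos 40 sd t m h1 h2
      (fun h => absurd h ht) (fun h => absurd h ht) hfwP hbwP hT1 hT2'
      (by intro _; omega) (by intro _; omega)
    obtain ⟨j', hj1', hj2', hj3', hj4', hj5'⟩ := locB_loc ys (pvCum ys (m-1) + sd + t)
      (by rw [pvCum_len]; exact hT2) (ys.length + 1) 1 (by omega) hn
      (by simp [pvCum]; omega) (by omega)
    have hjj : j = j' := loc_unique ys hpos hj1 hj2 hj3 hj4 hj1' hj2' hj3' hj4'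
    subst hjj
    rw [← hmN, hj5]
    unfold altBody
    rw [if_neg ht]
    simp only [prefix_eq]
    rw [show ((m:Int)) - 1 = ((m-1 : Nat) : Int) by omega]
    rw [pyGet_prefix ys (m-1) (by omega)]
    simp only [Option.getD_some]
    rw [if_neg (by simp only [not_or, not_lt]; exact ⟨hT1, hT2⟩)]
    rw [show ((List.range (ys.length + 1)).map (pvCum ys)).length = ys.length + 1 by simp]
    rw [show (1:Int) = ((1:Nat):Int) from rfl, hj5']
    simp


-- ===== VERDICT (by name: the statement is the Claim_ definition above) =====
theorem move_heb_date_spec : Claim_equal_move_heb_date := by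
  intro sd sm year_length t _ hpre
  obtain ⟨hys, hrest⟩ := hpre
  unfold Spec_move_heb_date
  by_cases h353 : year_length = 353
  · subst h353
    have hg : get_year_structure 353 = some ((preYs 353).getD []) := rfl
    have ha : alt_structures.get? 353 = some ((preYs 353).getD []) := rfl
    simp only [move_heb_date, move_heb_date_alt, hg, ha]
    simp only [if_neg (show ¬((preYs (353:Int)).getD [] = []) from by decide)]
    exact core _ (by decide) (by decide) (by decide) sd sm t hrest
  by_cases h354 : year_length = 354
  · subst h354
    have hg : get_year_structure 354 = some ((preYs 354).getD []) := rfl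
    have ha : alt_structures.get? 354 = some ((preYs 354).getD []) := rfl
    simp only [move_heb_date, move_heb_date_alt, hg, ha]
    simp only [if_neg (show ¬((preYs (354:Int)).getD [] = []) from by decide)]
    exact core _ (by decide) (by decide) (by decide) sd sm t hrest
  by_cases h355 : year_length = 355
  · subst h355
    have hg : get_year_structure 355 = some ((preYs 355).getD []) := rfl
    have ha : alt_structures.get? 355 = some ((preYs 355).getD []) := rfl
    simp only [move_heb_date, move_heb_date_alt, hg, ha]
    simp only [if_neg (show ¬((preYs (355:Int)).getD [] = []) from by decide)]
    exact core _ (by decide) (by decide) (by decide) sd sm t hrest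
  by_cases h383 : year_length = 383
  · subst h383
    have hg : get_year_structure 383 = some ((preYs 383).getD []) := rfl
    have ha : alt_structures.get? 383 = some ((preYs 383).getD []) := rfl
    simp only [move_heb_date, move_heb_date_alt, hg, ha]
    simp only [if_neg (show ¬((preYs (383:Int)).getD [] = []) from by decide)]
    exact core _ (by decide) (by decide) (by decide) sd sm t hrest
  by_cases h384 : year_length = 384
  · subst h384
    have hg : get_year_structure 384 = some ((preYs 384).getD []) := rfl
    have ha : alt_structures.get? 384 = some ((preYs 384).getD []) := rfl
    simp only [move_heb_date, move_heb_date_alt, hg, ha]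
    simp only [if_neg (show ¬((preYs (384:Int)).getD [] = []) from by decide)]
    exact core _ (by decide) (by decide) (by decide) sd sm t hrest
  by_cases h385 : year_length = 385
  · subst h385
    have hg : get_year_structure 385 = some ((preYs 385).getD []) := rfl
    have ha : alt_structures.get? 385 = some ((preYs 385).getD []) := rfl
    simp only [move_heb_date, move_heb_date_alt, hg, ha]
    simp only [if_neg (show ¬((preYs (385:Int)).getD [] = []) from by decide)]
    exact core _ (by decide) (by decide) (by decide) sd sm t hrest
  exfalso
  simp [preYs, h353, h354, h355, h383, h384, h385] at hys
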